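-- pv_equiv track=rewrite | github.com/oneozerova/synchronised-translator | speech-to-text/src/main-podlodka.py | find_anchor
-- ===== SOURCE A (Python) =====
-- def norm_word(w: str) -> str:
--     return w.lower().strip(".,!?…-_\"'()[]{}:;")
--
-- def find_anchor(committed, all_words):
--     norm_all = [norm_word(w) for w in all_words]
--     norm_comm = [norm_word(w) for w in committed]
--
--     for tail_len in range(min(5, len(norm_comm)), 0, -1):
--         tail = norm_comm[-tail_len:]
--         for i in range(len(norm_all) - tail_len + 1):
--             if norm_all[i:i + tail_len] == tail:
--                 return i + tail_len
--     return 0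
-- ===== SOURCE B (Python) =====
-- def norm_word(w: str) -> str:
--     return w.lower().strip(".,!?…-_\"'()[]{}:;")
--
-- def find_anchor(committed, all_words):
--     # Single ascending pass over positions: at each position compute the longest
--     # committed tail (<=5 words) matching there, and keep the best (longest,
--     # earliest) candidate; A instead loops tail lengths outermost and rescans.
--     norm_all = [norm_word(w) for w in all_words]
--     norm_comm = [norm_word(w) for w in committed]
--     n = len(norm_all)
--     m = len(norm_comm)
--     cap = min(5, m)
--     best_len = 0
--     best_pos = 0
--     for i in range(n):
--         match_len = 0
--         for L in range(min(cap, n - i), 0, -1):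
--             if norm_all[i:i + L] == norm_comm[m - L:]:
--                 match_len = L
--                 break
--         if match_len > best_len:
--             best_len = match_len
--             best_pos = i
--     return best_pos + best_len if best_len > 0 else 0
-- ===== Notes on version B (the rewrite author's own statement) =====
-- stated objective: alternative
-- what changed: B makes one ascending pass over positions of all_words, computing at each position the longest matching committed tail (<=5) and tracking the best (longest, then earliest) candidate, instead of A's outer loop over tail lengths with a fresh full scan per length.
import Mathlib
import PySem

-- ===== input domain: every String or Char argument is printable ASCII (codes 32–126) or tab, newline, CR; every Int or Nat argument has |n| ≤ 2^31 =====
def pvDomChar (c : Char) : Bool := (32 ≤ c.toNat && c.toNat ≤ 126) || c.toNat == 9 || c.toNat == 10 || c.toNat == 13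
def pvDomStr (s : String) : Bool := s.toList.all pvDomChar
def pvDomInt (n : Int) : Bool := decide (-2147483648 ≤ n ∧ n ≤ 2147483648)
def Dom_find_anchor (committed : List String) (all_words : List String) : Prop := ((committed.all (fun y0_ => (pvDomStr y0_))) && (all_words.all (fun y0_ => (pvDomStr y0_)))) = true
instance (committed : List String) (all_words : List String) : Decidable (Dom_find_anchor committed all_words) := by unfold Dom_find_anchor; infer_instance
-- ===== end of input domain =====

-- B replaces A's outer loop over tail lengths (each with a full rescan of all_words) by a single
-- ascending pass over positions that tracks the best (longest, then earliest) matching tail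
-- (objective: alternative decomposition, same asymptotic cost).

-- shared helper: norm_word, textually identical in Source A and Source B
def pvNormWord (w : String) : String :=
  PySem.Str.stripChars (PySem.Str.lower w) ".,!?…-_\"'()[]{}:;"

-- ===== PORT A =====
-- outer loop 'for tail_len in range(min(5,len),0,-1)' with early return; the inner
-- 'for i in range(…): if …: return i+tail_len' is find? over the same range
def pvAOuter (norm_all : List String) (norm_comm : List String) : List Int → Int
  | [] => 0
  | L :: rest =>
    let tail := PySem.List.slice norm_comm (some (-L)) none
    match (PySem.List.pyRange 0 ((norm_all.length : Int) - L + 1) 1).find?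
        (fun i => PySem.List.slice norm_all (some i) (some (i + L)) == tail) with
    | some i => i + L
    | none => pvAOuter norm_all norm_comm rest

def find_anchor (committed : List String) (all_words : List String) : Int :=
  let norm_all := all_words.map pvNormWord
  let norm_comm := committed.map pvNormWord
  pvAOuter norm_all norm_comm (PySem.List.pyRange (min 5 (norm_comm.length : Int)) 0 (-1))

-- ===== PORT B =====
-- inner loop 'for L in range(min(cap, n-i),0,-1): if …: match_len = L; break' (else 0)
def pvBLongestAt (norm_all norm_comm : List String) (cap i : Int) : Int :=
  match (PySem.List.pyRange (min cap ((norm_all.length : Int) - i)) 0 (-1)).find?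
      (fun L => PySem.List.slice norm_all (some i) (some (i + L))
                  == PySem.List.slice norm_comm (some ((norm_comm.length : Int) - L)) none) with
  | some L => L
  | none => 0

def find_anchor_alt (committed : List String) (all_words : List String) : Int :=
  let norm_all := all_words.map pvNormWord
  let norm_comm := committed.map pvNormWord
  let cap := min 5 (norm_comm.length : Int)
  let r := (PySem.List.pyRange 0 (norm_all.length : Int) 1).foldl
      (fun (s : Int × Int) i =>
        let l := pvBLongestAt norm_all norm_comm cap i
        if s.1 < l then (l, i) else s) ((0, 0) : Int × Int)
  if 0 < r.1 then r.2 + r.1 else 0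

-- ===== PRECONDITION & SPEC =====
def Spec_find_anchor (committed : List String) (all_words : List String) (out : Int) : Prop := out = find_anchor_alt committed all_words
instance (committed : List String) (all_words : List String) (out : Int) : Decidable (Spec_find_anchor committed all_words out) := by unfold Spec_find_anchor; infer_instance

-- ===== CLAIM (what is proved, stated in full; the proofs are below) =====
def Claim_equal_find_anchor : Prop := ∀ (committed : List String) (all_words : List String), Dom_find_anchor committed all_words → Spec_find_anchor committed all_words (find_anchor committed all_words)

-- ===== LEMMAS AND PROOFS =====

-- the match predicate both programs test, at Nat indices
def pvQ (na nc : List String) (L i : Nat) : Bool := (na.drop i).take L == nc.drop (nc.length - L)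

-- [K, K-1, …, 1]
def pvDesc : Nat → List Nat
  | 0 => []
  | K + 1 => (K + 1) :: pvDesc K

-- Nat-level restatement of A: try lengths K, K-1, …, 1, first position wins
def pvAd (na nc : List String) : Nat → Nat
  | 0 => 0
  | L + 1 =>
    match (List.range na.length).find? (fun i => pvQ na nc (L + 1) i) with
    | some i => i + (L + 1)
    | none => pvAd na nc L

-- Nat-level restatement of B's inner loop: longest L ≤ K matching at i
def pvL (na nc : List String) (K i : Nat) : Nat := Nat.findGreatest (fun L => pvQ na nc L i = true) K

-- Nat-level restatement of B's fold
def pvF (na nc : List String) (K n : Nat) : Nat × Nat :=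
  (List.range n).foldl (fun s i => let l := pvL na nc K i; if s.1 < l then (l, i) else s) (0, 0)

theorem pvDesc_mem {K L : Nat} : L ∈ pvDesc K ↔ 1 ≤ L ∧ L ≤ K := by
  induction K with
  | zero => simp [pvDesc]; omega
  | succ K ih => simp [pvDesc, ih]; omega

-- a match of length 1 ≤ L ≤ |nc| at i fits inside na
theorem pvQ_le (na nc : List String) (L i : Nat) (h1 : 1 ≤ L) (h2 : L ≤ nc.length)
    (hq : pvQ na nc L i = true) : i + L ≤ na.length := by
  have := congrArg List.length (by simpa [pvQ] using hq : (na.drop i).take L = nc.drop (nc.length - L))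
  simp [List.length_take, List.length_drop] at this
  omega

theorem pvRange_desc (K : Nat) : PySem.List.pyRange (K : Int) 0 (-1) = (pvDesc K).map (fun (L : Nat) => (L : Int)) := by
  induction K with
  | zero => simp [pvDesc, PySem.List.pyRange_neg_one_eq_nil]
  | succ K ih =>
    rw [show ((K + 1 : Nat) : Int) = (K : Int) + 1 by push_cast; ring]
    rw [PySem.List.pyRange_neg_one_cons (by positivity)]
    simp [pvDesc, ih]

theorem my_find?_congr {α : Type} (l : List α) (p q : α → Bool) (h : ∀ x ∈ l, p x = q x) :
    l.find? p = l.find? q := by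
  induction l with
  | nil => rfl
  | cons a l ih =>
    have ha := h a (by simp)
    simp only [List.find?, ha]
    cases hq : q a <;> simp [ih (fun x hx => h x (by simp [hx]))]

-- characterization of find? over an initial range: the least witness
theorem my_find?_range_some (n i : Nat) (p : Nat → Bool) (hi : i < n) (hp : p i = true)
    (hmin : ∀ j < i, p j = false) : (List.range n).find? p = some i := by
  induction n with
  | zero => omega
  | succ n ih =>
    rw [List.range_succ, List.find?_append]
    rcases Nat.lt_or_ge i n with h | h
    · rw [ih h]; rfl
    · have : i = n := by omega
      subst this
      rw [List.find?_eq_none.2 (fun j hj => by simp [hmin j (List.mem_range.1 hj)])]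
      simp [hp]

theorem my_find?_range_none (n : Nat) (p : Nat → Bool) (h : ∀ j < n, p j = false) :
    (List.range n).find? p = none :=
  List.find?_eq_none.2 (fun j hj => by simp [h j (List.mem_range.1 hj)])

-- shrink a range-find when the predicate is false beyond a
theorem my_find?_range_ext (a b : Nat) (p : Nat → Bool) (hab : a ≤ b)
    (h : ∀ j, a ≤ j → j < b → p j = false) :
    (List.range b).find? p = (List.range a).find? p := by
  induction b with
  | zero => have : a = 0 := by omega
            simp [this]
  | succ b ih =>
    rcases Nat.lt_or_ge a (b+1) with hlt | hge
    · have hab' : a ≤ b := by omega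
      rw [List.range_succ, List.find?_append, ih hab' (fun j hj1 hj2 => h j hj1 (by omega))]
      cases hfa : (List.range a).find? p with
      | some x => rfl
      | none => simp [h b (by omega) (by omega)]
    · have : a = b + 1 := by omega
      simp [this]

-- descending find? extends past the cap when the predicate is false above it
theorem pvDesc_find_ext (C K : Nat) (p : Nat → Bool) (hCK : C ≤ K)
    (h : ∀ L, C < L → L ≤ K → p L = false) :
    (pvDesc K).find? p = (pvDesc C).find? p := by
  induction K with
  | zero => have : C = 0 := by omega
            simp [this]
  | succ K ih =>
    rcases Nat.lt_or_ge C (K+1) with hlt | hge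
    · have : (pvDesc (K+1)).find? p = (pvDesc K).find? p := by
        simp [pvDesc, h (K+1) (by omega) (by omega)]
      rw [this, ih (by omega) (fun L h1 h2 => h L h1 (by omega))]
    · have : C = K + 1 := by omega
      simp [this]

-- descending find? computes Nat.findGreatest
theorem pvDesc_find_greatest (K : Nat) (p : Nat → Bool) :
    ((pvDesc K).find? p).getD 0 = Nat.findGreatest (fun L => p L = true) K := by
  induction K with
  | zero => simp [pvDesc]
  | succ K ih =>
    rw [Nat.findGreatest_succ]
    cases hp : p (K+1) with
    | true => simp [pvDesc, hp]
    | false => simp [pvDesc, hp, ih]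

theorem pvQ_false (na nc : List String) (L i : Nat) (h1 : 1 ≤ L) (h2 : L ≤ nc.length)
    (h : na.length < i + L) : pvQ na nc L i = false := by
  cases hq : pvQ na nc L i with
  | false => rfl
  | true => exact absurd (pvQ_le na nc L i h1 h2 hq) (by omega)

-- A's inner scan, reduced to a Nat-range find? of pvQ
theorem pvA_inner (na nc : List String) (L : Nat) (h1 : 1 ≤ L) (h2 : L ≤ nc.length) :
    (PySem.List.pyRange 0 ((na.length : Int) - (L : Int) + 1) 1).find?
        (fun i => PySem.List.slice na (some i) (some (i + (L : Int))) == nc.drop (nc.length - L))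
      = Option.map (fun (i : Nat) => (i : Int))
          ((List.range na.length).find? (fun i => pvQ na nc L i)) := by
  rw [PySem.List.pyRange_one, List.find?_map]
  simp only [zero_add, Function.comp_def]
  rcases Nat.lt_or_ge na.length L with hlt | hle
  case inr =>
    have hT : (((na.length : Int) - (L : Int) + 1) - 0).toNat = na.length - L + 1 := by omega
    rw [hT]
    rw [my_find?_congr _ _ (fun i => pvQ na nc L i) (by
      intro k _
      show (PySem.List.slice na (some ((k : Nat) : Int)) (some ((k : Nat) + (L : Int)))
              == nc.drop (nc.length - L)) = pvQ na nc L k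
      rw [PySem.List.slice_natCast_add]
      rfl)]
    rw [my_find?_range_ext (na.length - L + 1) na.length (fun i => pvQ na nc L i) (by omega)
      (fun j hj1 hj2 => pvQ_false na nc L j h1 h2 (by omega))]
  case inl =>
    have hT : (((na.length : Int) - (L : Int) + 1) - 0).toNat = 0 := by omega
    rw [hT]
    rw [my_find?_range_none na.length (fun i => pvQ na nc L i)
      (fun j hj => pvQ_false na nc L j h1 h2 (by omega))]
    rfl

-- ==== bridge for A ====
theorem pvA_bridge (na nc : List String) (K : Nat) (hK : K ≤ nc.length) :
    pvAOuter na nc (PySem.List.pyRange (K : Int) 0 (-1)) = ((pvAd na nc K : Nat) : Int) := by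
  induction K with
  | zero => rw [pvRange_desc]; rfl
  | succ K ih =>
    rw [pvRange_desc]
    show (match (PySem.List.pyRange 0 ((na.length : Int) - ((K + 1 : Nat) : Int) + 1) 1).find?
        (fun i => PySem.List.slice na (some i) (some (i + ((K + 1 : Nat) : Int)))
            == PySem.List.slice nc (some (-((K + 1 : Nat) : Int))) none) with
      | some i => i + ((K + 1 : Nat) : Int)
      | none => pvAOuter na nc ((pvDesc K).map (fun (L : Nat) => (L : Int)))) = _
    rw [PySem.List.slice_from_neg_natCast nc (k := K + 1) (by omega)]
    rw [pvA_inner na nc (K + 1) (by omega) hK]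
    rw [← pvRange_desc, ih (by omega)]
    show _ = ((pvAd na nc (K + 1) : Nat) : Int)
    unfold pvAd
    cases hf : (List.range na.length).find? (fun i => pvQ na nc (K + 1) i) with
    | some i =>
      simp only [Option.map_some]
      show (i : Int) + ((K + 1 : Nat) : Int) = (((i + (K + 1) : Nat)) : Int)
      push_cast
      ring
    | none => simp only [Option.map_none]; cases K <;> rfl

theorem pvF_succ (na nc : List String) (K n : Nat) :
    pvF na nc K (n + 1)
      = (if (pvF na nc K n).1 < pvL na nc K n then (pvL na nc K n, n) else pvF na nc K n) := by
  unfold pvF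
  rw [List.range_succ, List.foldl_append]
  rfl

-- ==== bridge for B ====
theorem pvB_inner_bridge (na nc : List String) (K i : Nat) (hK : K ≤ nc.length) (hi : i < na.length) :
    pvBLongestAt na nc (K : Int) (i : Int) = ((pvL na nc K i : Nat) : Int) := by
  unfold pvBLongestAt
  have hmin : min (K : Int) ((na.length : Int) - (i : Int)) = ((min K (na.length - i) : Nat) : Int) := by
    omega
  rw [hmin, pvRange_desc, List.find?_map]
  simp only [Function.comp_def]
  rw [my_find?_congr _ _ (fun L => pvQ na nc L i) (by
    intro L hL
    rw [pvDesc_mem] at hL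
    show (PySem.List.slice na (some ((i : Nat) : Int)) (some (((i : Nat) : Int) + ((L : Nat) : Int)))
            == PySem.List.slice nc (some ((nc.length : Int) - (L : Int))) none) = pvQ na nc L i
    have h2 : ((nc.length : Int) - (L : Int)) = ((nc.length - L : Nat) : Int) := by omega
    rw [PySem.List.slice_natCast_add, h2, PySem.List.slice_from_natCast]
    rfl)]
  rw [← pvDesc_find_ext (min K (na.length - i)) K _ (by omega)
      (fun L h1 h2 => pvQ_false na nc L i (by omega) (by omega) (by omega))]
  unfold pvL
  rw [← pvDesc_find_greatest]
  cases hf : (pvDesc K).find? (fun L => pvQ na nc L i) with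
  | some L => simp
  | none => simp

theorem pvB_fold_bridge (na nc : List String) (K n : Nat) (hK : K ≤ nc.length) (hn : n ≤ na.length) :
    (PySem.List.pyRange 0 (n : Int) 1).foldl
      (fun (s : Int × Int) i =>
        let l := pvBLongestAt na nc (K : Int) i
        if s.1 < l then (l, i) else s) ((0, 0) : Int × Int)
    = (((pvF na nc K n).1 : Int), ((pvF na nc K n).2 : Int)) := by
  induction n with
  | zero =>
    rw [PySem.List.pyRange_one_eq_nil (by omega)]
    rfl
  | succ n ih =>
    rw [show ((n + 1 : Nat) : Int) = (n : Int) + 1 by push_cast; ring,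
        PySem.List.pyRange_one_succ_right (by omega), List.foldl_append, ih (by omega)]
    show (let l := pvBLongestAt na nc (K : Int) (n : Int);
          if ((pvF na nc K n).1 : Int) < l then (l, (n : Int))
          else (((pvF na nc K n).1 : Int), ((pvF na nc K n).2 : Int)))
        = _
    rw [pvF_succ]
    simp only [pvB_inner_bridge na nc K n hK (by omega)]
    by_cases hc : (pvF na nc K n).1 < pvL na nc K n
    · rw [if_pos (by exact_mod_cast hc), if_pos hc]
    · rw [if_neg (by exact_mod_cast hc), if_neg hc]

-- ==== characterizations ====
theorem pvF_char (na nc : List String) (K n : Nat) :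
    (∀ i < n, pvL na nc K i ≤ (pvF na nc K n).1) ∧
    ((pvF na nc K n).1 = 0 → pvF na nc K n = (0, 0)) ∧
    (0 < (pvF na nc K n).1 →
      (pvF na nc K n).2 < n ∧ pvL na nc K (pvF na nc K n).2 = (pvF na nc K n).1 ∧
      ∀ j < (pvF na nc K n).2, pvL na nc K j < (pvF na nc K n).1) := by
  induction n with
  | zero => exact ⟨fun i hi => by omega, fun _ => rfl, fun h => by simp [pvF] at h⟩
  | succ n ih =>
    obtain ⟨ih1, ih2, ih3⟩ := ih
    rw [pvF_succ]
    by_cases hlt : (pvF na nc K n).1 < pvL na nc K n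
    · rw [if_pos hlt]
      refine ⟨fun i hi => ?_, fun h => by omega, fun _ => ⟨by omega, rfl, fun j hj => ?_⟩⟩
      · rcases Nat.lt_or_ge i n with h | h
        · exact le_of_lt (lt_of_le_of_lt (ih1 i h) hlt)
        · have : i = n := by omega
          simp [this]
      · exact lt_of_le_of_lt (ih1 j hj) hlt
    · rw [if_neg hlt]
      refine ⟨fun i hi => ?_, ih2, fun h => ?_⟩
      · rcases Nat.lt_or_ge i n with h | h
        · exact ih1 i h
        · have : i = n := by omega
          subst this
          omega
      · obtain ⟨h1, h2, h3⟩ := ih3 h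
        exact ⟨by omega, h2, h3⟩

theorem pvAd_none (na nc : List String) (K : Nat)
    (h : ∀ L, 1 ≤ L → L ≤ K → ∀ i < na.length, pvQ na nc L i = false) :
    pvAd na nc K = 0 := by
  induction K with
  | zero => rfl
  | succ K ih =>
    unfold pvAd
    rw [my_find?_range_none _ _ (fun i hi => h (K+1) (by omega) (by omega) i hi)]
    exact ih (fun L h1 h2 i hi => h L h1 (by omega) i hi)

theorem pvAd_some (na nc : List String) (K L0 i0 : Nat) (h1 : 1 ≤ L0) (h2 : L0 ≤ K)
    (hq : pvQ na nc L0 i0 = true) (hi0 : i0 < na.length)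
    (hmax : ∀ L, L0 < L → L ≤ K → ∀ i < na.length, pvQ na nc L i = false)
    (hmin : ∀ j < i0, pvQ na nc L0 j = false) :
    pvAd na nc K = i0 + L0 := by
  induction K with
  | zero => omega
  | succ K ih =>
    unfold pvAd
    rcases Nat.lt_or_ge L0 (K+1) with hlt | hge
    · rw [my_find?_range_none _ _ (fun i hi => hmax (K+1) (by omega) (by omega) i hi)]
      exact ih (by omega) (fun L ha hb i hi => hmax L ha (by omega) i hi)
    · have : L0 = K + 1 := by omega
      subst this
      rw [my_find?_range_some na.length i0 _ hi0 hq hmin]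

-- central combination: A's descending search equals B's best-tracking pass
theorem pv_central (na nc : List String) (K : Nat) :
    (pvAd na nc K : Int)
      = (if 0 < (pvF na nc K na.length).1
         then ((pvF na nc K na.length).2 : Int) + ((pvF na nc K na.length).1 : Int) else 0) := by
  obtain ⟨h1, h2, h3⟩ := pvF_char na nc K na.length
  by_cases hM : 0 < (pvF na nc K na.length).1
  · obtain ⟨hp, hLp, hmin⟩ := h3 hM
    rw [if_pos hM]
    have hLp' : Nat.findGreatest (fun L => pvQ na nc L (pvF na nc K na.length).2 = true) K
        = (pvF na nc K na.length).1 := hLp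
    have hQ : pvQ na nc (pvF na nc K na.length).1 (pvF na nc K na.length).2 = true :=
      ((Nat.findGreatest_eq_iff.1 hLp').2.1 (by omega))
    rw [pvAd_some na nc K (pvF na nc K na.length).1 (pvF na nc K na.length).2 hM
        (hLp ▸ Nat.findGreatest_le K) hQ hp
        (fun L hL1 hL2 i hi => by
          by_contra hq
          have : L ≤ pvL na nc K i :=
            Nat.le_findGreatest hL2 (by simpa using hq)
          have := h1 i hi
          omega)
        (fun j hj => by
          by_contra hq
          have : (pvF na nc K na.length).1 ≤ pvL na nc K j :=
            Nat.le_findGreatest (hLp ▸ Nat.findGreatest_le K) (by simpa using hq)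
          have := hmin j hj
          omega)]
    push_cast
    ring
  · rw [if_neg hM]
    have hz : (pvF na nc K na.length).1 = 0 := by omega
    rw [pvAd_none na nc K (fun L hL1 hL2 i hi => by
      by_contra hq
      have : L ≤ pvL na nc K i := Nat.le_findGreatest hL2 (by simpa using hq)
      have := h1 i hi
      omega)]
    rfl

-- ===== VERDICT (by name: the statement is the Claim_ definition above) =====
theorem find_anchor_spec : Claim_equal_find_anchor := by
  intro committed all_words _
  unfold Spec_find_anchor find_anchor find_anchor_alt
  set na := all_words.map pvNormWord
  set nc := committed.map pvNormWord
  show pvAOuter na nc (PySem.List.pyRange (min 5 ((nc.length : Int))) 0 (-1))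
      = (let r := (PySem.List.pyRange 0 ((na.length : Int)) 1).foldl
           (fun (s : Int × Int) i =>
             let l := pvBLongestAt na nc (min 5 ((nc.length : Int))) i
             if s.1 < l then (l, i) else s) ((0, 0) : Int × Int)
         if 0 < r.1 then r.2 + r.1 else 0)
  have hKi : min 5 ((nc.length : Int)) = ((min 5 nc.length : Nat) : Int) := by omega
  have hK : min 5 nc.length ≤ nc.length := by omega
  rw [hKi, pvA_bridge na nc (min 5 nc.length) hK]
  simp only [pvB_fold_bridge na nc (min 5 nc.length) na.length hK le_rfl]
  rw [pv_central na nc (min 5 nc.length)]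
  by_cases h : 0 < (pvF na nc (min 5 nc.length) na.length).1
  · rw [if_pos h, if_pos (by exact_mod_cast h)]
  · rw [if_neg h, if_neg (by exact_mod_cast h)]
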